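-- pv_equiv track=rewrite | github.com/pythongus/metabob | hackerrank/rangoli.py | create_lines
-- ===== SOURCE A (Python) =====
-- from typing import List
--
-- BASE_CHAR = 96
--
-- def create_lines(size: int):
--     rows, cols, middle = get_dimensions(size)
--     lines = []
--     for i in get_change_positions_in_rows(middle, size):
--         line_draw = ['-'] * cols
--         add_characters(i, line_draw, middle)
--         lines.append(line_draw)
--
--     return lines
--
-- def get_dimensions(size: int):
--     rows = size * 2 - 1
--     cols = rows * 2 - 1
--     middle = cols // 2 + 1
--     return rows, cols, middle
--
-- def get_change_positions_in_rows(middle: int, size: int):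
--     offset = [i for i in range(size, 0, -1)] + [i for i in range(2, size + 1)]
--     positions = [tuple(range(middle - i, middle + i + 1, 2)) for i in range(0, middle, 2)] + \
--                 [tuple(range(middle - i, middle + i + 1, 2))  for i in range(middle - 3, -1, -2)]
--     return zip(positions, offset)
--
-- def add_characters(positions: List[tuple], line_draw: list, middle: int):
--     line_columns, offset = positions
--     for pos in line_columns:
--         line_draw[pos - 1] = chr(BASE_CHAR + offset + abs(middle - pos) // 2)
-- ===== SOURCE B (Python) =====
-- def create_lines(size):
--     letters = [chr(97 + i) for i in range(size)]
--     top = []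
--     for i in range(size):
--         row = '-' * (2 * i) + '-'.join(letters[i:][::-1] + letters[i + 1:]) + '-' * (2 * i)
--         top.append(list(row))
--     return top[1:][::-1] + top
-- ===== Notes on version B (the rewrite author's own statement) =====
-- stated objective: simpler
-- what changed: B builds each row of the top half once as a string -- the mirrored letter run joined with '-' and padded on both sides -- and mirrors that half to get the full pattern, instead of A's scheme of computing, for every one of the 2n-1 rows, a tuple of write positions and an offset and mutating a dash array character by character.
import Mathlib
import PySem

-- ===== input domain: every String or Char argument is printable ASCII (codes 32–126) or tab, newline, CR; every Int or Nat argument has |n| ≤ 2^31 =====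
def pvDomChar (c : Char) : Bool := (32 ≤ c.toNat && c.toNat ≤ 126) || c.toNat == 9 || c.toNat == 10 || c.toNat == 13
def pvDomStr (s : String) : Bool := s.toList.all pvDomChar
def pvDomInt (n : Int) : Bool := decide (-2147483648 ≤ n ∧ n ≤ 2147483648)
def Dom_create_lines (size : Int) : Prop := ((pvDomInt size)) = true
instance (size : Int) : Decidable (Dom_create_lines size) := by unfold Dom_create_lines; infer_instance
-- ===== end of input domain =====

-- B rebuilds each rangoli row by string joining/centering and mirrors the top half,
-- instead of A's positional character writes into dash arrays for every row (objective: simpler).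


-- ===== PORT A =====
-- get_dimensions(size)
def pvGetDims (size : Int) : Int × Int × Int :=
  let rows := size * 2 - 1
  let cols := rows * 2 - 1
  let middle := PySem.Int.floordiv cols 2 + 1
  (rows, cols, middle)

-- add_characters(positions, line_draw, middle); line_draw[pos-1] = ... is pySetD
-- (every write of A is in range, so the total form matches Python's mutation exactly)
def pvAddChars (positions : List Int × Int) (line_draw : List String) (middle : Int) : List String :=
  positions.1.foldl (fun ld pos =>
    PySem.List.pySetD ld (pos - 1)
      (String.singleton (Char.ofNat (96 + positions.2 + PySem.Int.floordiv ((middle - pos).natAbs : Int) 2).toNat))) line_draw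

-- get_change_positions_in_rows(middle, size)
def pvChangePositions (middle : Int) (size : Int) : List (List Int × Int) :=
  let offset := PySem.List.pyRange size 0 (-1) ++ PySem.List.pyRange 2 (size + 1) 1
  let positions :=
    (PySem.List.pyRange 0 middle 2).map (fun i => PySem.List.pyRange (middle - i) (middle + i + 1) 2) ++
    (PySem.List.pyRange (middle - 3) (-1) (-2)).map (fun i => PySem.List.pyRange (middle - i) (middle + i + 1) 2)
  positions.zip offset

def create_lines (size : Int) : List (List String) :=
  let d := pvGetDims size
  (pvChangePositions d.2.2 size).foldl (fun lines i =>
    let line_draw := List.replicate d.2.1.toNat "-"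
    lines ++ [pvAddChars i line_draw d.2.2]) []

-- ===== PORT B =====
-- letters[i:][::-1] and letters[i+1:] are PySem slices; '-'.join is PySem.Chars.join
-- (single-char Python strings are carried as Chars and turned into String at list(row))
def create_lines_alt (size : Int) : List (List String) :=
  let letters : List (List Char) := (PySem.List.pyRange 0 size 1).map (fun i => [Char.ofNat (97 + i).toNat])
  let top := (PySem.List.pyRange 0 size 1).foldl (fun top i =>
    let row : List Char :=
      List.replicate (2 * i).toNat '-' ++
      PySem.Chars.join ['-']
        (((PySem.List.slice? (PySem.List.slice letters (some i) none) none none (-1)).getD []) ++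
          PySem.List.slice letters (some (i + 1)) none) ++
      List.replicate (2 * i).toNat '-'
    top ++ [row.map String.singleton]) []
  ((PySem.List.slice? (PySem.List.slice top (some 1) none) none none (-1)).getD []) ++ top

-- ===== PRECONDITION & SPEC =====
def Spec_create_lines (size : Int) (out : List (List String)) : Prop := out = create_lines_alt size
instance (size : Int) (out : List (List String)) : Decidable (Spec_create_lines size out) := by unfold Spec_create_lines; infer_instance

-- ===== CLAIM (what is proved, stated in full; the proofs are below) =====
def Claim_equal_create_lines : Prop := ∀ (size : Int), Dom_create_lines size → Spec_create_lines size (create_lines size)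

-- ===== LEMMAS AND PROOFS =====

-- the common shape both programs produce: cell j of the row whose innermost letter is chr(97+t)
def pvCell (n t j : Nat) : String :=
  if j % 2 = 0 ∧ 2 * t ≤ j ∧ j + 2 * t ≤ 4 * n - 4 then
    String.singleton (Char.ofNat (97 + t + ((n : Int) - 1 - (j / 2 : Nat)).natAbs))
  else "-"

def pvRow (n t : Nat) : List String := (List.range (4 * n - 3)).map (pvCell n t)

def pvSpec (n : Nat) : List (List String) :=
  (List.range (2 * n - 1)).map (fun (r : Nat) => pvRow n (((n : Int) - 1 - (r : Int)).natAbs))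

def pvChs (n : Nat) : List Char := (List.range n).map (fun k => Char.ofNat (97 + k))

lemma pvA_nonpos {size : Int} (h : size ≤ 0) : create_lines size = [] := by
  unfold create_lines pvChangePositions
  rw [PySem.List.pyRange_neg_one_eq_nil h, PySem.List.pyRange_one_eq_nil (by omega)]
  simp

lemma pvB_nonpos {size : Int} (h : size ≤ 0) : create_lines_alt size = [] := by
  unfold create_lines_alt
  rw [PySem.List.pyRange_one_eq_nil h]
  simp [PySem.List.slice_from_one, PySem.List.slice?_none_none_neg_one]

lemma pvA_struct (n : Nat) (h : 1 ≤ n) :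
    create_lines (n : Int) =
      (List.range n).map (fun (k : Nat) =>
        pvAddChars (PySem.List.pyRange ((2*n-1 : Nat) - 2*(k:Int)) ((2*n-1 : Nat) + 2*(k:Int) + 1) 2, (n : Int) - (k:Int))
          (List.replicate (4*n-3) "-") ((2*n-1 : Nat) : Int)) ++
      (List.range (n-1)).map (fun (q : Nat) =>
        pvAddChars (PySem.List.pyRange ((2*n-1 : Nat) - ((2*n-4 : Int) - 2*(q:Int))) ((2*n-1 : Nat) + ((2*n-4 : Int) - 2*(q:Int)) + 1) 2, 2 + (q:Int))
          (List.replicate (4*n-3) "-") ((2*n-1 : Nat) : Int)) := by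
  unfold create_lines pvGetDims pvChangePositions
  simp only []
  have hm : PySem.Int.floordiv (((n:Int) * 2 - 1) * 2 - 1) 2 + 1 = ((2*n-1 : Nat) : Int) := by
    rw [PySem.Int.floordiv_eq_ediv_of_pos (by norm_num)]; omega
  rw [hm]
  have hcols : (((n:Int) * 2 - 1) * 2 - 1).toNat = 4*n-3 := by omega
  rw [hcols]
  rw [PySem.List.pyRange_neg_one]
  rw [show ((n:Int) - 0).toNat = n by omega]
  rw [show ((n:Int) + 1) = ((2:Int)) + ((n-1 : Nat) : Int) by omega]
  rw [PySem.List.pyRange_one]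
  rw [show ((2:Int) + ((n-1:Nat):Int) - 2).toNat = n - 1 by omega]
  rw [PySem.List.pyRange_of_pos 0 ((2*n-1 : Nat) : Int) (by norm_num)]
  rw [show (if (0:Int) < ((2*n-1:Nat):Int) then ((((2*n-1:Nat):Int) - 0 + 2 - 1)/2).toNat else 0) = n by
    rw [if_pos (by omega)]; omega]
  rw [PySem.List.pyRange_of_neg (((2*n-1:Nat):Int) - 3) (-1) (by norm_num)]
  rw [show (if (-1:Int) < ((2*n-1:Nat):Int) - 3 then ((((2*n-1:Nat):Int) - 3 - (-1) + -(-2) - 1) / -(-2)).toNat else 0) = n - 1 by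
    by_cases h2 : 2 ≤ n
    · rw [if_pos (by omega)]; push_cast; omega
    · rw [if_neg (by omega)]; omega]
  rw [List.map_map, List.map_map]
  rw [List.zip_append (by simp), List.zip_map', List.zip_map']
  rw [PySem.List.foldl_append_singleton_eq_map]
  rw [List.nil_append, List.map_append, List.map_map, List.map_map]
  congr 1
  · apply List.map_congr_left
    intro k hk
    simp only [Function.comp_apply]
    congr 2
    all_goals try congr 1
    all_goals omega
  · apply List.map_congr_left
    intro q hq
    simp only [Function.comp_apply]
    congr 2
    all_goals try congr 1
    all_goals omega

lemma pv_writes_getElem? (f : Int → String) (poss : List Int) (base : List String)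
    (hpos : ∀ p ∈ poss, 1 ≤ p) (j : Nat) :
    (poss.foldl (fun ld p => PySem.List.pySetD ld (p - 1) (f p)) base)[j]? =
      if ((j : Int) + 1) ∈ poss ∧ j < base.length then some (f ((j : Int) + 1)) else base[j]? := by
  induction poss generalizing base with
  | nil => simp
  | cons p ps ih =>
    have hp : 1 ≤ p := hpos p (List.mem_cons_self ..)
    simp only [List.foldl_cons]
    rw [ih _ (fun q hq => hpos q (List.mem_cons_of_mem _ hq))]
    rw [PySem.List.pySetD_of_nonneg _ _ (by omega)]
    simp only [List.length_set, List.getElem?_set, List.mem_cons]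
    by_cases hj : j < base.length
    · by_cases hpj : p.toNat - 1 = j
      · have hpe : (j : Int) + 1 = p := by omega
        simp [hj, hpj, hpe]
      · have hpe : ¬ ((j : Int) + 1 = p) := by omega
        simp [hj, hpj, hpe]
    · have hb : base[j]? = none := List.getElem?_eq_none (by omega)
      by_cases hpj : p.toNat - 1 = j
      · simp [hj, hpj]
      · simp [hj, hpj]

lemma pvA_row (n d : Nat) (hd : d < n) :
    pvAddChars (PySem.List.pyRange ((2*n-1 : Nat) - 2*(d:Int)) ((2*n-1 : Nat) + 2*(d:Int) + 1) 2, (n : Int) - (d:Int))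
        (List.replicate (4*n-3) "-") ((2*n-1 : Nat) : Int) = pvRow n (n-1-d) := by
  unfold pvAddChars pvRow
  apply List.ext_getElem?
  intro j
  rw [pv_writes_getElem? _ _ _ (by
    intro p hp
    rw [PySem.List.mem_pyRange_iff_of_pos (by norm_num)] at hp
    omega)]
  rw [List.getElem?_map]
  simp only [PySem.List.mem_pyRange_iff_of_pos (by norm_num : (0:Int) < 2)]
  simp only [List.length_replicate, List.getElem?_replicate]
  by_cases hj : j < 4*n-3
  · rw [List.getElem?_range hj]
    simp only [Option.map_some]
    unfold pvCell
    by_cases hc : j % 2 = 0 ∧ 2 * (n-1-d) ≤ j ∧ j + 2 * (n-1-d) ≤ 4 * n - 4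
    · rw [if_pos ⟨⟨by omega, by omega, ⟨((j:Int) + 2*d + 2 - 2*n)/2, by omega⟩⟩, hj⟩, if_pos hc]
      congr 2
      rw [PySem.Int.floordiv_eq_ediv_of_pos (by norm_num)]
      congr 1
      omega
    · rw [if_neg (by
        rintro ⟨⟨h1, h2, k, hk⟩, -⟩
        exact hc (by omega)), if_neg hc, if_pos hj]
  · rw [if_neg (by omega), if_neg hj, List.getElem?_eq_none (l := List.range _) (by simp; omega)]
    simp

lemma pvSpec_split (n : Nat) (h : 1 ≤ n) :
    pvSpec n = (List.range n).map (fun (k : Nat) => pvRow n (n-1-k)) ++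
      (List.range (n-1)).map (fun (q : Nat) => pvRow n (q+1)) := by
  unfold pvSpec
  rw [show 2*n-1 = n + (n-1) by omega, List.range_add, List.map_append, List.map_map]
  congr 1
  · apply List.map_congr_left
    intro k hk
    rw [List.mem_range] at hk
    congr 1
    omega
  · apply List.map_congr_left
    intro q hq
    rw [List.mem_range] at hq
    simp only [Function.comp_apply]
    congr 1
    omega

lemma pvA_spec (n : Nat) (h : 1 ≤ n) : create_lines (n : Int) = pvSpec n := by
  rw [pvA_struct n h, pvSpec_split n h]
  congr 1
  · apply List.map_congr_left
    intro k hk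
    rw [List.mem_range] at hk
    exact pvA_row n k hk
  · apply List.map_congr_left
    intro q hq
    rw [List.mem_range] at hq
    rw [show ((2*n-4 : Int) - 2*(q:Int)) = 2*(((n-2-q : Nat)):Int) by omega,
        show ((2:Int) + (q:Int)) = (n : Int) - ((n-2-q : Nat) : Int) by omega,
        pvA_row n (n-2-q) (by omega)]
    congr 1
    omega

lemma pv_join_length (s : Char) (cs : List Char) (h : cs ≠ []) :
    (PySem.Chars.join [s] (cs.map (fun c => [c]))).length = 2 * cs.length - 1 := by
  induction cs with
  | nil => simp at h
  | cons c cs ih =>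
    cases cs with
    | nil => simp [PySem.Chars.join_singleton]
    | cons c' rest =>
      have hj : PySem.Chars.join [s] ((c :: c' :: rest).map (fun c => [c])) =
          [c] ++ [s] ++ PySem.Chars.join [s] ((c' :: rest).map (fun c => [c])) := by
        rw [List.map_cons]
        exact PySem.Chars.join_cons_cons _ _ _ _
      rw [hj, List.length_append, List.length_append, ih (by simp)]
      simp only [List.length_cons, List.length_nil]
      omega

lemma pv_join_getElem? (s : Char) (cs : List Char) (u : Nat) :
    (PySem.Chars.join [s] (cs.map (fun c => [c])))[u]? =
      if u % 2 = 0 then cs[u/2]? else if u + 1 < 2 * cs.length then some s else none := by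
  induction cs generalizing u with
  | nil =>
    rw [List.map_nil, PySem.Chars.join_nil]
    by_cases hu : u % 2 = 0 <;> simp [hu]
  | cons c cs ih =>
    cases cs with
    | nil =>
      rw [List.map_cons, List.map_nil, PySem.Chars.join_singleton]
      match u with
      | 0 => simp
      | 1 => simp
      | (v+2) =>
        have h2 : ((v+2) % 2 = v % 2) := by omega
        rw [h2]
        by_cases hv : v % 2 = 0
        · rw [if_pos hv]
          rw [List.getElem?_eq_none (l := [c]) (by simp), List.getElem?_eq_none (l := [c]) (by simp)]
        · rw [if_neg hv, if_neg (by simp)]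
          rw [List.getElem?_eq_none (l := [c]) (by simp)]
    | cons c' rest =>
      have hj : PySem.Chars.join [s] ((c :: c' :: rest).map (fun c => [c])) =
          [c] ++ [s] ++ PySem.Chars.join [s] ((c' :: rest).map (fun c => [c])) := by
        rw [List.map_cons]
        exact PySem.Chars.join_cons_cons _ _ _ _
      rw [hj]
      match u with
      | 0 => simp
      | 1 =>
        simp only [List.length_cons]
        rw [if_neg (by omega), if_pos (by omega)]
        simp
      | (v+2) =>
        have hsh : (([c] ++ [s] ++ PySem.Chars.join [s] ((c' :: rest).map (fun c => [c]))))[v+2]? =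
            (PySem.Chars.join [s] ((c' :: rest).map (fun c => [c])))[v]? := by
          rw [List.getElem?_append (l₁ := [c] ++ [s]), if_neg (by simp)]
          simp
        rw [hsh, ih v]
        have h2 : ((v+2) % 2 = v % 2) := by omega
        have h3 : ((v+2) / 2 = v / 2 + 1) := by omega
        rw [h2, h3]
        by_cases hv : v % 2 = 0
        · simp [hv]
        · rw [if_neg hv, if_neg hv]
          simp only [List.length_cons]
          by_cases hb : v + 1 < 2 * (rest.length + 1)
          · rw [if_pos hb, if_pos (by omega)]
          · rw [if_neg hb, if_neg (by omega)]

lemma pv_cs_len (n t : Nat) (ht : t < n) :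
    (((pvChs n).drop t).reverse ++ (pvChs n).drop (t+1)).length = 2*(n-t)-1 := by
  simp [pvChs]
  omega

lemma pv_cs_get (n t : Nat) (ht : t < n) (s : Nat) :
    (((pvChs n).drop t).reverse ++ (pvChs n).drop (t+1))[s]? =
      if _hs : s < 2*(n-t)-1 then
        some (Char.ofNat (97 + (if s < n - t then n-1-s else t+1+(s-(n-t)))))
      else none := by
  have hlen : (pvChs n).length = n := by simp [pvChs]
  rw [List.getElem?_append]
  simp only [List.length_reverse, List.length_drop, hlen]
  by_cases h1 : s < n - t
  · rw [if_pos h1, List.getElem?_reverse (by simp [hlen]; omega)]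
    simp only [List.length_drop, hlen]
    rw [List.getElem?_drop]
    unfold pvChs
    rw [List.getElem?_map, List.getElem?_range (by omega)]
    rw [dif_pos (by omega), if_pos h1]
    simp only [Option.map_some]
    congr 2
    omega
  · rw [if_neg h1, List.getElem?_drop]
    unfold pvChs
    rw [List.getElem?_map]
    by_cases h2 : s < 2*(n-t)-1
    · rw [List.getElem?_range (by omega), dif_pos h2, if_neg h1]
      simp only [Option.map_some]
    · rw [List.getElem?_eq_none (l := List.range n) (by simp; omega), dif_neg h2]
      simp

lemma pvB_row (n t : Nat) (ht : t < n) :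
    ((List.replicate ((2*(t:Int)).toNat) '-' ++
      PySem.Chars.join ['-']
        (((PySem.List.slice? (PySem.List.slice ((pvChs n).map (fun c => [c])) (some (t:Int)) none) none none (-1)).getD []) ++
          PySem.List.slice ((pvChs n).map (fun c => [c])) (some ((t:Int) + 1)) none) ++
      List.replicate ((2*(t:Int)).toNat) '-').map String.singleton) = pvRow n t := by
  rw [PySem.List.slice_from _ (by omega : (0:Int) ≤ (t:Int)),
      PySem.List.slice?_none_none_neg_one, Option.getD_some,
      show ((t:Int) + 1) = (((t+1 : Nat)) : Int) by push_cast; ring,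
      PySem.List.slice_from _ (by omega : (0:Int) ≤ (((t+1 : Nat)) : Int))]
  simp only [Int.toNat_natCast]
  rw [show ((2*(t:Int)).toNat) = 2*t by omega]
  rw [← List.map_drop, ← List.map_drop, ← List.map_reverse, ← List.map_append]
  set cs := ((pvChs n).drop t).reverse ++ (pvChs n).drop (t+1) with hcs
  have hlen : cs.length = 2*(n-t)-1 := pv_cs_len n t ht
  have hne : cs ≠ [] := by
    intro hnil
    rw [hnil] at hlen
    simp at hlen
    omega
  apply List.ext_getElem?
  intro j
  rw [List.getElem?_map, List.append_assoc]
  unfold pvRow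
  rw [List.getElem?_map]
  rw [List.getElem?_append]
  simp only [List.length_replicate]
  by_cases h1 : j < 2*t
  · rw [if_pos h1, List.getElem?_replicate, if_pos h1, List.getElem?_range (by omega)]
    simp only [Option.map_some]
    unfold pvCell
    rw [if_neg (by omega)]
    rfl
  · rw [if_neg h1]
    rw [List.getElem?_append]
    rw [pv_join_length _ _ hne, hlen]
    by_cases h2 : j - 2*t < 2 * (2*(n-t)-1) - 1
    · rw [if_pos h2, pv_join_getElem?, hlen]
      by_cases h3 : (j - 2*t) % 2 = 0
      · rw [if_pos h3, pv_cs_get n t ht, dif_pos (by omega)]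
        rw [List.getElem?_range (by omega)]
        simp only [Option.map_some]
        unfold pvCell
        rw [if_pos (show j % 2 = 0 ∧ 2 * t ≤ j ∧ j + 2 * t ≤ 4 * n - 4 by omega)]
        by_cases h4 : (j - 2*t)/2 < n - t
        · rw [if_pos h4]
          congr 3
          omega
        · rw [if_neg h4]
          congr 3
          omega
      · rw [if_neg h3, if_pos (by omega), List.getElem?_range (by omega)]
        simp only [Option.map_some]
        unfold pvCell
        rw [if_neg (by omega)]
        rfl
    · rw [if_neg h2, List.getElem?_replicate]
      by_cases h4 : j - 2*t - (2*(2*(n-t)-1)-1) < 2*t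
      · rw [if_pos h4, List.getElem?_range (by omega)]
        simp only [Option.map_some]
        unfold pvCell
        rw [if_neg (by omega)]
        rfl
      · rw [if_neg h4, List.getElem?_eq_none (l := List.range _) (by simp; omega)]
        simp

lemma pvB_letters (n : Nat) :
    (List.range n).map (fun (k : Nat) => [Char.ofNat ((97 : Int) + (k : Int)).toNat]) =
      (pvChs n).map (fun c => [c]) := by
  unfold pvChs
  rw [List.map_map]
  apply List.map_congr_left
  intro k hk
  simp only [Function.comp_apply]
  congr 1

lemma pvB_struct (n : Nat) (h : 1 ≤ n) :
    create_lines_alt (n : Int) =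
      ((((List.range n).map (fun (t : Nat) => pvRow n t)).tail).reverse) ++ (List.range n).map (fun (t : Nat) => pvRow n t) := by
  unfold create_lines_alt
  simp only []
  rw [PySem.List.pyRange_one]
  rw [show ((n:Int) - 0).toNat = n by omega]
  rw [List.map_map, PySem.List.foldl_append_singleton_eq_map, List.nil_append, List.map_map]
  have htop : ∀ (g : Nat → List String),
      (∀ t < n, g t = pvRow n t) → (List.range n).map g = (List.range n).map (fun (t : Nat) => pvRow n t) := by
    intro g hg
    apply List.map_congr_left
    intro t htm
    exact hg t (List.mem_range.mp htm)
  rw [htop _ (by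
    intro t htn
    simp only [Function.comp_def, zero_add]
    rw [pvB_letters n]
    exact pvB_row n t htn)]
  rw [PySem.List.slice_from_one, PySem.List.slice?_none_none_neg_one]
  simp

lemma pvSpec_mirror (n : Nat) (h : 1 ≤ n) :
    ((((List.range n).map (fun (t : Nat) => pvRow n t)).tail).reverse) ++ (List.range n).map (fun (t : Nat) => pvRow n t) = pvSpec n := by
  unfold pvSpec
  apply List.ext_getElem?
  intro r
  rw [List.getElem?_append]
  simp only [List.length_reverse, List.length_tail, List.length_map, List.length_range]
  by_cases hr : r < n - 1
  · rw [if_pos hr]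
    rw [List.getElem?_reverse (by simp; omega)]
    simp only [List.length_tail, List.length_map, List.length_range]
    rw [List.getElem?_tail, List.getElem?_map, List.getElem?_map]
    rw [List.getElem?_range (by omega), List.getElem?_range (by omega)]
    simp only [Option.map_some]
    congr 2
    omega
  · rw [if_neg hr]
    by_cases hr2 : r < 2*n - 1
    · rw [List.getElem?_map, List.getElem?_map]
      rw [List.getElem?_range (by omega), List.getElem?_range (by omega)]
      simp only [Option.map_some]
      congr 2
      omega
    · rw [List.getElem?_map, List.getElem?_map,
          List.getElem?_eq_none (l := List.range n) (by simp; omega),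
          List.getElem?_eq_none (l := List.range (2*n-1)) (by simp; omega)]
      simp


lemma pvB_spec (n : Nat) (h : 1 ≤ n) : create_lines_alt (n : Int) = pvSpec n := by
  rw [pvB_struct n h, pvSpec_mirror n h]

-- ===== VERDICT (by name: the statement is the Claim_ definition above) =====
theorem create_lines_spec : Claim_equal_create_lines := by
  intro size _
  unfold Spec_create_lines
  by_cases h : size ≤ 0
  · rw [pvA_nonpos h, pvB_nonpos h]
  · have h1 : size = ((size.toNat : Nat) : Int) := by omega
    rw [h1, pvA_spec _ (by omega), pvB_spec _ (by omega)]
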